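-- pv_equiv track=rewrite | github.com/arnavam/arc-prize | dsl.py | concat_h
-- ===== SOURCE A (Python) =====
-- def concat_h(grids, background=0):
--     if not grids:
--         return []
--
--     # Calculate dimensions
--     heights = [len(g) for g in grids if g]
--     widths = [len(g[0]) for g in grids if g and g[0]]
--     if not heights or not widths:
--         return []
--
--     total_height = max(heights)
--     total_width = sum(widths)
--     result = [[background] * total_width for _ in range(total_height)]
--
--     # Paste grids side-by-side
--     col_offset = 0
--     for g in grids:
--         if not g or not g[0]:
--             continue
--         h, w = len(g), len(g[0])
--         for r in range(h):
--             for c in range(w):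
--                 result[r][col_offset + c] = g[r][c]
--         col_offset += w
--     return result
-- ===== SOURCE B (Python) =====
-- def concat_h(grids, background=0):
--     if not grids:
--         return []
--     present = [g for g in grids if g and g[0]]
--     if not present:
--         return []
--     total_height = max(len(g) for g in grids if g)
--     out = []
--     for r in range(total_height):
--         row = []
--         for g in present:
--             w = len(g[0])
--             if r < len(g):
--                 row.extend(g[r][c] for c in range(w))
--             else:
--                 row.extend([background] * w)
--         out.append(row)
--     return out
-- ===== Notes on version B (the rewrite author's own statement) =====
-- stated objective: alternative
-- what changed: B builds the output row by row, concatenating each present grid's cells (or a background run) per row, instead of A's preallocated background canvas mutated in place with a running column offset; Pre_ excludes jagged grids on which both raise IndexError.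
import Mathlib
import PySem

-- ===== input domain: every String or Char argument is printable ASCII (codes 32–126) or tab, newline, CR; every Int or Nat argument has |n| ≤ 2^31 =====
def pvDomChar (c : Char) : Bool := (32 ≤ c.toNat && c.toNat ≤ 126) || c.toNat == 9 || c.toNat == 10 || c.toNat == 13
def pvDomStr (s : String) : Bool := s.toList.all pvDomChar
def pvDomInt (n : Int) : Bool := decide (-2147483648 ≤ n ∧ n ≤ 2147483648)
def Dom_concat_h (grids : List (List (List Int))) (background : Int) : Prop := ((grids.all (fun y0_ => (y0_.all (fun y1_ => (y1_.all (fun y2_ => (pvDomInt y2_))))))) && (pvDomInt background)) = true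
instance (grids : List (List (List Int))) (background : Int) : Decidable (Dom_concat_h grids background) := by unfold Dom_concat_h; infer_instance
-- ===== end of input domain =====

-- B builds the output row by row (one flat pass per output row) instead of A's
-- preallocate-a-canvas-and-paste-with-column-offsets; same values, different decomposition.

-- `g and g[0]` (grid contributes columns)
def pvPresent (g : List (List Int)) : Bool := !g.isEmpty && !(g.headD []).isEmpty

-- `len(g[0])`
def pvWidth (g : List (List Int)) : Nat := (g.headD []).length

-- ===== PORT A =====
-- the inner writes read g[r][c]; Python raises IndexError when a row is shorter than
-- len(g[0]) — those inputs are excluded by Pre_concat_h, the port totalises with 0 there.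
def pvStep (st : List (List Int) × Nat) (g : List (List Int)) : List (List Int) × Nat :=
  if pvPresent g then
    ((List.range g.length).foldl (fun res r =>
        res.modify r (fun row =>
          (List.range (pvWidth g)).foldl
            (fun row c => row.set (st.2 + c) ((g.getD r []).getD c 0)) row)) st.1,
     st.2 + pvWidth g)
  else st

-- heights = [len(g) for g in grids if g]; widths = [len(g[0]) for g in grids if g and g[0]]
-- total_height = max(heights); total_width = sum(widths); canvas then paste fold
def concat_h (grids : List (List (List Int))) (background : Int) : List (List Int) :=
  if grids = [] then [] else
  if (grids.filter (fun g => !g.isEmpty)).map List.length = []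
      ∨ (grids.filter pvPresent).map pvWidth = [] then [] else
  (grids.foldl pvStep
    (List.replicate (((grids.filter (fun g => !g.isEmpty)).map List.length).foldl max 0)
      (List.replicate ((grids.filter pvPresent).map pvWidth).sum background), 0)).1

-- ===== PORT B =====
-- cells of grid g contributed to output row r (indexing c in range(w), as in Source B)
def pvRowCells (background : Int) (r : Nat) (g : List (List Int)) : List Int :=
  if r < g.length then (List.range (pvWidth g)).map (fun c => (g.getD r []).getD c 0)
  else List.replicate (pvWidth g) background

-- out = [row built left-to-right across the present grids, for r in range(total_height)]
def concat_h_alt (grids : List (List (List Int))) (background : Int) : List (List Int) :=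
  if grids = [] then [] else
  if grids.filter pvPresent = [] then [] else
  (List.range (((grids.filter (fun g => !g.isEmpty)).map List.length).foldl max 0)).map
    (fun r => (grids.filter pvPresent).flatMap (pvRowCells background r))

-- ===== PRECONDITION & SPEC =====
-- Pre_ excludes exactly the inputs on which A raises IndexError: a contributing grid
-- having some row shorter than its first row.
def Pre_concat_h (grids : List (List (List Int))) (background : Int) : Prop :=
  ∀ g ∈ grids, pvPresent g = true → ∀ row ∈ g, pvWidth g ≤ row.length

instance (grids : List (List (List Int))) (background : Int) : Decidable (Pre_concat_h grids background) := by unfold Pre_concat_h; infer_instance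

def pvWitness_concat_h : List (List (List Int)) × Int := ([[[1, 2], [3, 4]], [[5], [6], [7]]], 0)

def Spec_concat_h (grids : List (List (List Int))) (background : Int) (out : List (List Int)) : Prop := out = concat_h_alt grids background
instance (grids : List (List (List Int))) (background : Int) (out : List (List Int)) : Decidable (Spec_concat_h grids background out) := by unfold Spec_concat_h; infer_instance

-- ===== CLAIM (what is proved, stated in full; the proofs are below) =====
def Claim_equal_concat_h : Prop := ∀ (grids : List (List (List Int))) (background : Int), Dom_concat_h grids background → Pre_concat_h grids background → Spec_concat_h grids background (concat_h grids background)

-- ===== LEMMAS AND PROOFS =====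

-- total width contributed by a list of grids
def pvWsum (gs : List (List (List Int))) : Nat := ((gs.filter pvPresent).map pvWidth).sum

lemma pvRowCells_length (bg : Int) (r : Nat) (g : List (List Int)) :
    (pvRowCells bg r g).length = pvWidth g := by
  unfold pvRowCells; split <;> simp

lemma set_append_len (l1 l2 : List Int) (a b : Int) :
    (l1 ++ a :: l2).set l1.length b = l1 ++ b :: l2 := by
  induction l1 with
  | nil => simp
  | cons x xs ih => simp [List.set, ih]

-- the inner c-loop of A rewrites exactly the w background cells after `pre`
lemma row_paste (w : Nat) (v : Nat → Int) (pre tail : List Int) (bg : Int) :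
    (List.range w).foldl (fun row c => row.set (pre.length + c) (v c))
      (pre ++ List.replicate w bg ++ tail)
    = pre ++ (List.range w).map v ++ tail := by
  induction w generalizing tail with
  | zero => simp
  | succ w ih =>
    rw [List.range_succ, List.foldl_append]
    have hrep : List.replicate (w + 1) bg = List.replicate w bg ++ [bg] := by
      simp [List.replicate_succ']
    rw [hrep]
    have : (pre ++ (List.replicate w bg ++ [bg]) ++ tail)
        = pre ++ List.replicate w bg ++ ([bg] ++ tail) := by simp
    rw [this, ih ([bg] ++ tail)]
    have hlen : (pre ++ (List.range w).map v).length = pre.length + w := by simp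
    simp only [List.foldl_cons, List.foldl_nil, List.range_succ, List.map_append]
    have := set_append_len (pre ++ (List.range w).map v) tail bg (v w)
    simp only [List.append_assoc, List.cons_append, List.nil_append] at this ⊢
    rw [← hlen]
    simpa using this

-- the r-loop of modifies, on a row-indexed map
lemma modify_map_range (n i : Nat) (f : Nat → List Int) (φ : List Int → List Int) :
    ((List.range n).map f).modify i φ
    = (List.range n).map (fun r => if r = i then φ (f r) else f r) := by
  apply List.ext_getElem
  · simp [List.length_modify]
  · intro j h1 h2
    simp only [List.getElem_modify, List.getElem_map, List.getElem_range]
    by_cases hij : i = j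
    · subst hij; simp
    · simp [hij, Ne.symm hij]

lemma fold_modify (h n : Nat) (φ : Nat → List Int → List Int) (f : Nat → List Int) :
    (List.range h).foldl (fun res r => res.modify r (φ r)) ((List.range n).map f)
    = (List.range n).map (fun r => if r < h then φ r (f r) else f r) := by
  induction h generalizing f with
  | zero => simp
  | succ h ih =>
    rw [List.range_succ, List.foldl_append]
    simp only [List.foldl_cons, List.foldl_nil]
    rw [ih, modify_map_range]
    apply List.ext_getElem (by simp)
    intro j h1 h2
    simp only [List.getElem_map, List.getElem_range]
    by_cases hj : j = h
    · subst hj; simp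
    · have hlt : (j < h) = (j < h + 1) := by
        apply propext; constructor <;> intro <;> omega
      simp [hj, hlt]

-- main invariant of A's paste fold
lemma fold_paste (bg : Int) (gs : List (List (List Int))) :
    ∀ (n off rest : Nat) (pref : Nat → List Int),
    (∀ r, (pref r).length = off) →
    (∀ g ∈ gs, pvPresent g = true → g.length ≤ n) →
    pvWsum gs ≤ rest →
    (gs.foldl pvStep ((List.range n).map (fun r => pref r ++ List.replicate rest bg), off)).1
    = (List.range n).map
        (fun r => pref r ++ (gs.filter pvPresent).flatMap (pvRowCells bg r)
                   ++ List.replicate (rest - pvWsum gs) bg) := by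
  induction gs with
  | nil => intro n off rest pref _ _ _; simp [pvWsum]
  | cons g gs ih =>
    intro n off rest pref hpref hH hrest
    by_cases hp : pvPresent g = true
    · have hw : pvWidth g + pvWsum gs ≤ rest := by
        have : pvWsum (g :: gs) = pvWidth g + pvWsum gs := by
          simp [pvWsum, hp]
        omega
      rw [List.foldl_cons]
      have hstep : pvStep ((List.range n).map (fun r => pref r ++ List.replicate rest bg), off) g
          = ((List.range n).map
              (fun r => (pref r ++ pvRowCells bg r g) ++ List.replicate (rest - pvWidth g) bg),
             off + pvWidth g) := by
        simp only [pvStep, hp, if_pos]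
        refine Prod.ext ?_ rfl
        simp only
        rw [fold_modify]
        apply congrArg (List.map · (List.range n))
        funext r
        have hsplit : List.replicate rest bg
            = List.replicate (pvWidth g) bg ++ List.replicate (rest - pvWidth g) bg := by
          rw [← List.replicate_add]
          congr 1
          omega
        by_cases hr : r < g.length
        · rw [if_pos hr, hsplit]
          have := row_paste (pvWidth g) (fun c => (g.getD r []).getD c 0)
              (pref r) (List.replicate (rest - pvWidth g) bg) bg
          rw [hpref r] at this
          simp only [← List.append_assoc] at this ⊢
          rw [this]
          simp [pvRowCells, hr]
        · rw [if_neg hr, hsplit]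
          simp [pvRowCells, hr]
      rw [hstep]
      rw [ih n (off + pvWidth g) (rest - pvWidth g) (fun r => pref r ++ pvRowCells bg r g)
        (fun r => by simp [hpref r, pvRowCells_length])
        (fun g' hg' hp' => hH g' (List.mem_cons_of_mem _ hg') hp')
        (by omega)]
      apply congrArg (List.map · (List.range n))
      funext r
      have hfil : (g :: gs).filter pvPresent = g :: gs.filter pvPresent := by
        simp [List.filter_cons, hp]
      have hws : pvWsum (g :: gs) = pvWidth g + pvWsum gs := by simp [pvWsum, hp]
      rw [hfil, List.flatMap_cons]
      have : rest - pvWsum (g :: gs) = rest - pvWidth g - pvWsum gs := by omega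
      rw [this]
      simp [List.append_assoc]
    · have hfil : (g :: gs).filter pvPresent = gs.filter pvPresent := by
        simp [List.filter_cons, hp]
      have hws : pvWsum (g :: gs) = pvWsum gs := by simp [pvWsum, List.filter_cons, hp]
      rw [List.foldl_cons]
      have hstep : pvStep ((List.range n).map (fun r => pref r ++ List.replicate rest bg), off) g
          = ((List.range n).map (fun r => pref r ++ List.replicate rest bg), off) := by
        simp [pvStep, hp]
      rw [hstep, ih n off rest pref hpref
        (fun g' hg' hp' => hH g' (List.mem_cons_of_mem _ hg') hp') (hws ▸ hrest), hfil, hws]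

lemma init_le_foldl_max (l : List Nat) : ∀ init : Nat, init ≤ l.foldl max init := by
  induction l with
  | nil => intro init; simp
  | cons x xs ih =>
    intro init
    exact le_trans (le_max_left init x) (ih (max init x))

lemma le_foldl_max (l : List Nat) : ∀ (init a : Nat), a ∈ l → a ≤ l.foldl max init := by
  induction l with
  | nil => intro _ _ h; cases h
  | cons x xs ih =>
    intro init a ha
    rcases List.mem_cons.mp ha with h | h
    · subst h
      exact le_trans (le_max_right init a) (init_le_foldl_max xs (max init a))
    · exact ih (max init x) a h

theorem concat_h_eq (grids : List (List (List Int))) (background : Int) :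
    concat_h grids background = concat_h_alt grids background := by
  unfold concat_h concat_h_alt
  by_cases h0 : grids = []
  · simp [h0]
  · rw [if_neg h0, if_neg h0]
    by_cases hp : grids.filter pvPresent = []
    · rw [if_pos (Or.inr (by simp [hp])), if_pos hp]
    · have hwne : (grids.filter pvPresent).map pvWidth ≠ [] := by simp [hp]
      have hhne : (grids.filter (fun g => !g.isEmpty)).map List.length ≠ [] := by
        intro hcon
        apply hp
        rw [List.map_eq_nil_iff, List.filter_eq_nil_iff] at hcon
        rw [List.filter_eq_nil_iff]
        intro g hg hpg
        exact hcon g hg (by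
          have := (Bool.and_eq_true _ _).mp hpg
          exact this.1)
      rw [if_neg (by tauto), if_neg hp]
      have hrep : List.replicate (((grids.filter (fun g => !g.isEmpty)).map List.length).foldl max 0)
            (List.replicate ((grids.filter pvPresent).map pvWidth).sum background)
          = (List.range (((grids.filter (fun g => !g.isEmpty)).map List.length).foldl max 0)).map
              (fun r => (fun _ : Nat => ([] : List Int)) r
                ++ List.replicate ((grids.filter pvPresent).map pvWidth).sum background) := by
        simp [List.map_const']
      rw [hrep]
      rw [fold_paste background grids
        (((grids.filter (fun g => !g.isEmpty)).map List.length).foldl max 0) 0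
        ((grids.filter pvPresent).map pvWidth).sum (fun _ : Nat => ([] : List Int)) (fun _ => rfl)
        (fun g hg hpg => by
          apply le_foldl_max
          rw [List.mem_map]
          exact ⟨g, List.mem_filter.mpr ⟨hg, (Bool.and_eq_true _ _).mp hpg |>.1⟩, rfl⟩)
        (by simp [pvWsum])]
      have : ((grids.filter pvPresent).map pvWidth).sum - pvWsum grids = 0 := by
        simp [pvWsum]
      rw [this]
      simp

-- ===== VERDICT (by name: the statement is the Claim_ definition above) =====
theorem concat_h_spec : Claim_equal_concat_h := by
  intro grids background _ _
  unfold Spec_concat_h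
  exact concat_h_eq grids background
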